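-- pv_equiv track=rewrite | github.com/PacificDou/algorithm | coding/binary_indexed_tree.py | querySingle
-- ===== SOURCE A (Python) =====
-- def lowbit(idx):
--     return (idx & (-idx))
--
-- def querySingle(bit, idx):
--     ret = bit[idx]
--     stop = idx - lowbit(idx)
--     cur = idx - 1
--     while cur != stop:
--         ret -= bit[cur]
--         cur -= lowbit(cur)
--     return ret
-- ===== SOURCE B (Python) =====
-- def lowbit(idx):
--     return (idx & (-idx))
--
-- def querySingle(bit, idx):
--     def prefix(i):
--         s = 0
--         while i != 0:
--             s += bit[i]
--             i -= lowbit(i)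
--         return s
--     return prefix(idx) - prefix(idx - 1)
-- ===== Notes on version B (the rewrite author's own statement) =====
-- stated objective: simpler
-- what changed: A computes the single element in one combined downward walk from bit[idx] exploiting the cancellation at idx - lowbit(idx); B instead defines the textbook prefix-sum helper prefix(i) (accumulate bit[i], i -= lowbit(i) until i == 0) and returns prefix(idx) - prefix(idx-1).
-- outside the precondition, e.g. on querySingle([5, 3], -1): A returns 3, B raises IndexError
import Mathlib
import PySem

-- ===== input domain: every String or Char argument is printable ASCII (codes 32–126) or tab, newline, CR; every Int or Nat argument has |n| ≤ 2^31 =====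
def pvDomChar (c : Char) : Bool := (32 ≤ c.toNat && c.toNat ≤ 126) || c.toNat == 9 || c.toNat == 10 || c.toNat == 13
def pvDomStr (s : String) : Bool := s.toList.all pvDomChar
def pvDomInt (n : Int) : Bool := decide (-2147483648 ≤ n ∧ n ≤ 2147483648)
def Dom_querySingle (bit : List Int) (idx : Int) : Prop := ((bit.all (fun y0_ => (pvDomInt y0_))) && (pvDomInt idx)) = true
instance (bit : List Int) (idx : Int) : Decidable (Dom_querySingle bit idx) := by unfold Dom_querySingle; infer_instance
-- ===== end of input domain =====

-- B replaces A's single combined walk by the textbook prefix-sum difference prefix(idx) - prefix(idx-1) (objective: simpler).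


-- ===== PORT A =====
-- lowbit(idx) = idx & (-idx)
def lowbit (idx : Int) : Int := PySem.Int.band idx (-idx)

-- the 'while cur != stop' loop; fuel only makes the recursion total (enough iterations are
-- available on every input admitted by Pre_); a none from pyGet? is Python's IndexError
-- (outside Pre_), the value returned then is irrelevant.
def qsLoop (bit : List Int) (stop : Int) : Nat → Int → Int → Int
  | 0, ret, _ => ret
  | f + 1, ret, cur =>
    if cur = stop then ret
    else
      match PySem.List.pyGet? bit cur with
      | none => ret
      | some v => qsLoop bit stop f (ret - v) (cur - lowbit cur)

def querySingle (bit : List Int) (idx : Int) : Int :=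
  match PySem.List.pyGet? bit idx with
  | none => 0
  | some ret => qsLoop bit (idx - lowbit idx) (idx.natAbs + bit.length + 1) ret (idx - 1)

-- ===== PORT B =====
-- the inner helper 'prefix(i)': s = 0; while i != 0: s += bit[i]; i -= lowbit(i); return s
-- (same fuel convention as above)
def prefixLoop (bit : List Int) : Nat → Int → Int → Int
  | 0, s, _ => s
  | f + 1, s, i =>
    if i = 0 then s
    else
      match PySem.List.pyGet? bit i with
      | none => s
      | some v => prefixLoop bit f (s + v) (i - lowbit i)

def pfx (bit : List Int) (i : Int) : Int := prefixLoop bit (i.natAbs + 1) 0 i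

def querySingle_alt (bit : List Int) (idx : Int) : Int :=
  pfx bit idx - pfx bit (idx - 1)

-- ===== PRECONDITION & SPEC =====
-- Pre_ is the valid 1-based range of a binary indexed tree. It excludes idx ≤ 0 and
-- idx ≥ len(bit): there Python A either raises IndexError (idx = 0, idx ≥ len, deep
-- negative idx) or, for some negative idx, returns an accidental combination of trailing
-- elements by negative-index wraparound — inputs on which B's prefix loop walks off the
-- front of the list and raises IndexError instead of returning.
def Pre_querySingle (bit : List Int) (idx : Int) : Prop := 0 < idx ∧ idx < bit.length
instance (bit : List Int) (idx : Int) : Decidable (Pre_querySingle bit idx) := by unfold Pre_querySingle; infer_instance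
def pvWitness_querySingle : List Int × Int := ([1, 2, 3], 1)

def Spec_querySingle (bit : List Int) (idx : Int) (out : Int) : Prop := out = querySingle_alt bit idx
instance (bit : List Int) (idx : Int) (out : Int) : Decidable (Spec_querySingle bit idx out) := by unfold Spec_querySingle; infer_instance

-- ===== CLAIM (what is proved, stated in full; the proofs are below) =====
def Claim_equal_querySingle : Prop := ∀ (bit : List Int) (idx : Int), Dom_querySingle bit idx → Pre_querySingle bit idx → Spec_querySingle bit idx (querySingle bit idx)

-- ===== LEMMAS AND PROOFS =====

-- lowbit of a positive integer, expressed over Nat: m & (-m) = m - (m AND (m-1))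
theorem lowbit_coe (m : Nat) (h : 0 < m) :
    lowbit (m : Int) = ((m - (m &&& (m - 1)) : Nat) : Int) := by
  unfold lowbit PySem.Int.band
  split_ifs with h1 h2
  · omega
  · have e1 : ((m : Int)).toNat = m := by omega
    have e2 : (-(-(m : Int)) - 1).toNat = m - 1 := by omega
    rw [e1, e2]
  · omega
  · omega

theorem nat_and_pred_odd (m : Nat) (h : m % 2 = 1) : m &&& (m - 1) = m - 1 := by
  apply Nat.eq_of_testBit_eq
  intro i
  cases i with
  | zero =>
      rw [Nat.testBit_and]
      have h2 : (m - 1) % 2 = 0 := by omega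
      simp [Nat.testBit_zero, h, h2]
  | succ i =>
      rw [Nat.testBit_and]
      simp only [Nat.testBit_succ]
      have e : (m - 1) / 2 = m / 2 := by omega
      rw [e]
      cases (m / 2).testBit i <;> simp

theorem nat_and_pred_double (m : Nat) (h : 0 < m) :
    (2 * m) &&& (2 * m - 1) = 2 * (m &&& (m - 1)) := by
  apply Nat.eq_of_testBit_eq
  intro i
  cases i with
  | zero =>
      rw [Nat.testBit_and]
      have h1 : (2 * m) % 2 = 0 := by omega
      have h2 : (2 * (m &&& (m - 1))) % 2 = 0 := by omega
      simp [Nat.testBit_zero, h1, h2]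
  | succ i =>
      rw [Nat.testBit_and]
      simp only [Nat.testBit_succ]
      have e1 : (2 * m) / 2 = m := by omega
      have e2 : (2 * m - 1) / 2 = m - 1 := by omega
      have e3 : (2 * (m &&& (m - 1))) / 2 = m &&& (m - 1) := by omega
      rw [e1, e2, e3, Nat.testBit_and]

theorem lowbit_pos_le (n : Int) (h : 0 < n) : 1 ≤ lowbit n ∧ lowbit n ≤ n := by
  obtain ⟨m, rfl⟩ : ∃ m : Nat, (m : Int) = n := ⟨n.toNat, by omega⟩
  have hm : 0 < m := by omega
  rw [lowbit_coe m hm]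
  have hle : m &&& (m - 1) ≤ m - 1 := Nat.and_le_right
  omega

theorem lowbit_odd (n : Int) (h : 0 < n) (ho : n % 2 = 1) : lowbit n = 1 := by
  obtain ⟨m, rfl⟩ : ∃ m : Nat, (m : Int) = n := ⟨n.toNat, by omega⟩
  have hm : 0 < m := by omega
  have hmo : m % 2 = 1 := by omega
  rw [lowbit_coe m hm, nat_and_pred_odd m hmo]
  omega

theorem lowbit_double (n : Int) (h : 0 < n) : lowbit (2 * n) = 2 * lowbit n := by
  obtain ⟨m, rfl⟩ : ∃ m : Nat, (m : Int) = n := ⟨n.toNat, by omega⟩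
  have hm : 0 < m := by omega
  have h2 : ((2 * m : Nat) : Int) = 2 * (m : Int) := by push_cast; ring
  rw [← h2, lowbit_coe (2 * m) (by omega), lowbit_coe m hm, nat_and_pred_double m hm]
  have hle : m &&& (m - 1) ≤ m - 1 := Nat.and_le_right
  omega

-- the walk of A's loop: cur, cur - lowbit cur, … reaches s
inductive Reach : Int → Int → Prop
  | refl (c : Int) : Reach c c
  | step (c s : Int) : 0 < c → Reach (c - lowbit c) s → Reach c s

theorem reach_le {c s : Int} (h : Reach c s) : s ≤ c := by
  induction h with
  | refl c => omega
  | step c s hc _ ih =>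
      have := lowbit_pos_le c hc
      omega

theorem reach_double {a b : Int} (h : Reach a b) : Reach (2 * a) (2 * b) := by
  induction h with
  | refl c => exact Reach.refl _
  | step c s hc _ ih =>
      refine Reach.step _ _ (by omega) ?_
      rw [lowbit_double c hc]
      have e : 2 * c - 2 * lowbit c = 2 * (c - lowbit c) := by ring
      rw [e]
      exact ih

-- the BIT cancellation fact: walking down from m-1 lands exactly on m - lowbit m
theorem reach_key : ∀ m : Nat, 0 < m → Reach ((m : Int) - 1) ((m : Int) - lowbit m) := by
  intro m
  induction m using Nat.strong_induction_on with
  | _ m ih =>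
    intro hm
    rcases Nat.even_or_odd m with ⟨j, hj⟩ | ⟨j, hj⟩
    · -- m = 2j even
      have hj' : m = 2 * j := by omega
      have hj0 : 0 < j := by omega
      have hcast : (m : Int) = 2 * (j : Int) := by rw [hj']; push_cast; ring
      have hodd1 : lowbit ((m : Int) - 1) = 1 := by
        apply lowbit_odd _ (by omega)
        omega
      refine Reach.step _ _ (by omega) ?_
      rw [hodd1]
      have ihj := reach_double (ih j (by omega) hj0)
      rw [hcast, lowbit_double _ (by exact_mod_cast hj0)]
      have e1 : 2 * (j : Int) - 1 - 1 = 2 * ((j : Int) - 1) := by ring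
      have e2 : 2 * (j : Int) - 2 * lowbit j = 2 * ((j : Int) - lowbit j) := by ring
      rw [e1, e2]
      exact ihj
    · -- m odd: zero iterations
      have h1 : lowbit (m : Int) = 1 := by
        apply lowbit_odd _ (by exact_mod_cast hm)
        omega
      rw [h1]
      exact Reach.refl _

-- prefixLoop: the accumulator splits off
theorem prefixLoop_acc (bit : List Int) :
    ∀ (f : Nat) (a i : Int), prefixLoop bit f a i = a + prefixLoop bit f 0 i := by
  intro f
  induction f with
  | zero => intro a i; simp [prefixLoop]
  | succ f ih =>
      intro a i
      simp only [prefixLoop]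
      by_cases h0 : i = 0
      · simp [h0]
      · simp only [h0, if_false]
        cases hg : PySem.List.pyGet? bit i with
        | none => simp
        | some v => simp only []; rw [ih (a + v), ih (0 + v)]; ring

-- prefixLoop: the result does not depend on the fuel, as long as it covers i (for 0 ≤ i)
theorem prefixLoop_fuel (bit : List Int) :
    ∀ (f f' : Nat) (i a : Int), 0 ≤ i → i.toNat ≤ f → i.toNat ≤ f' →
      prefixLoop bit f a i = prefixLoop bit f' a i := by
  intro f
  induction f with
  | zero =>
      intro f' i a hi hf hf'
      have h0 : i = 0 := by omega
      subst h0
      cases f' <;> simp [prefixLoop]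
  | succ f ih =>
      intro f' i a hi hf hf'
      by_cases h0 : i = 0
      · subst h0; cases f' <;> simp [prefixLoop]
      · have hpos : 0 < i := by omega
        obtain ⟨g, rfl⟩ : ∃ g, f' = g + 1 := ⟨f' - 1, by omega⟩
        simp only [prefixLoop, h0, if_false]
        cases hg : PySem.List.pyGet? bit i with
        | none => rfl
        | some v =>
            have hlb := lowbit_pos_le i hpos
            exact ih g (i - lowbit i) (a + v) (by omega) (by omega) (by omega)

-- one reduction step of prefixLoop when the guard and the list access both go through
theorem prefixLoop_step (bit : List Int) (f : Nat) (a c v : Int) (h0 : c ≠ 0)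
    (hg : PySem.List.pyGet? bit c = some v) :
    prefixLoop bit (f + 1) a c = prefixLoop bit f (a + v) (c - lowbit c) := by
  simp only [prefixLoop, h0, if_false, hg]

-- unfolding one step of pfx at a positive in-range index
theorem pfx_step (bit : List Int) (c : Int) (hc : 0 < c) (hlen : c < (bit.length : Int)) :
    ∃ v, PySem.List.pyGet? bit c = some v ∧ pfx bit c = v + pfx bit (c - lowbit c) := by
  have hget : PySem.List.pyGet? bit c = some (bit[c.toNat]'(by omega)) :=
    PySem.List.pyGet?_eq_some_getElem bit (by omega) (by omega)
  refine ⟨_, hget, ?_⟩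
  have hlb := lowbit_pos_le c hc
  unfold pfx
  rw [prefixLoop_step bit c.natAbs 0 c _ (by omega) hget]
  rw [prefixLoop_acc bit c.natAbs (0 + bit[c.toNat]'(by omega))]
  rw [prefixLoop_fuel bit c.natAbs ((c - lowbit c).natAbs + 1) (c - lowbit c) 0
        (by omega) (by omega) (by omega)]
  ring

-- the main loop correspondence: A's walk from c down to s equals the prefix-sum difference
theorem qsLoop_eq (bit : List Int) :
    ∀ (c s : Int), Reach c s → 0 ≤ s → c < (bit.length : Int) →
      ∀ (ret : Int) (f : Nat), c.toNat ≤ f →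
        qsLoop bit s f ret c = ret - (pfx bit c - pfx bit s) := by
  intro c s hreach
  induction hreach with
  | refl c =>
      intro _ _ ret f _
      cases f <;> simp [qsLoop]
  | step c s hc htail ih =>
      intro hs hlen ret f hf
      have hlb := lowbit_pos_le c hc
      have hslt : s ≤ c - lowbit c := reach_le htail
      obtain ⟨g, rfl⟩ : ∃ g, f = g + 1 := ⟨f - 1, by omega⟩
      obtain ⟨v, hget, hstep⟩ := pfx_step bit c hc hlen
      simp only [qsLoop, show ¬ c = s by omega, if_false, hget]
      rw [ih hs (by omega) (ret - v) g (by omega), hstep]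
      ring

-- ===== VERDICT (by name: the statement is the Claim_ definition above) =====
theorem querySingle_spec : Claim_equal_querySingle := by
  intro bit idx _ hpre
  obtain ⟨hpos, hlen⟩ := hpre
  unfold Spec_querySingle querySingle querySingle_alt
  have hget : PySem.List.pyGet? bit idx = some (bit[idx.toNat]'(by omega)) :=
    PySem.List.pyGet?_eq_some_getElem bit (by omega) (by omega)
  simp only [hget]
  have hlb := lowbit_pos_le idx hpos
  have hkey : Reach (idx - 1) (idx - lowbit idx) := by
    have := reach_key idx.toNat (by omega)
    have hc : ((idx.toNat : Nat) : Int) = idx := by omega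
    rwa [hc] at this
  rw [qsLoop_eq bit (idx - 1) (idx - lowbit idx) hkey (by omega) (by omega)
        (bit[idx.toNat]'(by omega)) (idx.natAbs + bit.length + 1) (by omega)]
  obtain ⟨v, hgetv, hstepv⟩ := pfx_step bit idx hpos hlen
  rw [hget] at hgetv
  have hv : bit[idx.toNat]'(by omega) = v := by injection hgetv
  rw [hstepv, ← hv]
  ring
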